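-- pv_equiv track=rewrite | github.com/MythologIQ/Hearthlink | tests/e2e/api/api_test_runner.py | _calculate_latency_distribution
-- ===== SOURCE A (Python) =====
-- from typing import Dict, List, Any
--
-- def _calculate_latency_distribution(tests: List[Dict]) -> Dict[str, int]:
--     """Calculate latency distribution buckets"""
--     latencies = [t['latency_ms'] for t in tests]
--
--     distribution = {
--         'under_100ms': sum(1 for l in latencies if l < 100),
--         '100_250ms': sum(1 for l in latencies if 100 <= l < 250),
--         '250_500ms': sum(1 for l in latencies if 250 <= l < 500),
--         '500_1000ms': sum(1 for l in latencies if 500 <= l < 1000),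
--         'over_1000ms': sum(1 for l in latencies if l >= 1000)
--     }
--
--     return distribution
-- ===== SOURCE B (Python) =====
-- def _calculate_latency_distribution(tests):
--     """Calculate latency distribution buckets (single pass)"""
--     distribution = {
--         'under_100ms': 0,
--         '100_250ms': 0,
--         '250_500ms': 0,
--         '500_1000ms': 0,
--         'over_1000ms': 0,
--     }
--     for t in tests:
--         l = t['latency_ms']
--         if l < 100:
--             distribution['under_100ms'] += 1
--         elif l < 250:
--             distribution['100_250ms'] += 1
--         elif l < 500:
--             distribution['250_500ms'] += 1
--         elif l < 1000:
--             distribution['500_1000ms'] += 1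
--         elif l >= 1000:
--             distribution['over_1000ms'] += 1
--     return distribution
-- ===== Notes on version B (the rewrite author's own statement) =====
-- stated objective: alternative
-- what changed: Replaces five separate generator-expression scans over a prebuilt latency list with a single loop over the tests that classifies each latency once via an if/elif chain into pre-zeroed buckets.
import Mathlib
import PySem

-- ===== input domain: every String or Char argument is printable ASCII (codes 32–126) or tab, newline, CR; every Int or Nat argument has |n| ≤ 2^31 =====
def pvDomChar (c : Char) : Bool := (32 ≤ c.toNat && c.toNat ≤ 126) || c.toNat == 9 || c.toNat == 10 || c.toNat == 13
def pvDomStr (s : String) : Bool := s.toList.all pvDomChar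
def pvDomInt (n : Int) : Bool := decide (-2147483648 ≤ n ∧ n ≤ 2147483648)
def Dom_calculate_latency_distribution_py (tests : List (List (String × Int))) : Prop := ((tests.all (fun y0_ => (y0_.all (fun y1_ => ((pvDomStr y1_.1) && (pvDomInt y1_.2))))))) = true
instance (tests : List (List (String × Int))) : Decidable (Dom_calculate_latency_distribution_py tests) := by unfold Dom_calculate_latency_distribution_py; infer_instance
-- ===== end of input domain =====

-- B replaces A's five separate counting scans over the latency list with one pass
-- classifying each latency once via an if/elif chain (constant-factor faster).

-- ===== PORT A =====
-- t['latency_ms']: first-match association-list lookup; Pre_ guarantees the key is present,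
-- so the getD default is never used on admitted inputs (KeyError inputs are excluded by Pre_).
def pyGetLatency (t : List (String × Int)) : Int := (List.lookup "latency_ms" t).getD 0

def calculate_latency_distribution_py (tests : List (List (String × Int))) : List (String × Int) :=
  let latencies := tests.map pyGetLatency
  [("under_100ms",  latencies.foldl (fun s l => if l < 100 then s + 1 else s) (0 : Int)),
   ("100_250ms",    latencies.foldl (fun s l => if 100 ≤ l ∧ l < 250 then s + 1 else s) (0 : Int)),
   ("250_500ms",    latencies.foldl (fun s l => if 250 ≤ l ∧ l < 500 then s + 1 else s) (0 : Int)),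
   ("500_1000ms",   latencies.foldl (fun s l => if 500 ≤ l ∧ l < 1000 then s + 1 else s) (0 : Int)),
   ("over_1000ms",  latencies.foldl (fun s l => if 1000 ≤ l then s + 1 else s) (0 : Int))]

-- ===== PORT B =====
def altStep (acc : Int × Int × Int × Int × Int) (t : List (String × Int)) : Int × Int × Int × Int × Int :=
  let l := pyGetLatency t
  let (a, b, c, d, e) := acc
  if l < 100 then (a + 1, b, c, d, e)
  else if l < 250 then (a, b + 1, c, d, e)
  else if l < 500 then (a, b, c + 1, d, e)
  else if l < 1000 then (a, b, c, d + 1, e)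
  else if 1000 ≤ l then (a, b, c, d, e + 1)
  else (a, b, c, d, e)

def calculate_latency_distribution_py_alt (tests : List (List (String × Int))) : List (String × Int) :=
  let r := tests.foldl altStep (0, 0, 0, 0, 0)
  [("under_100ms", r.1), ("100_250ms", r.2.1), ("250_500ms", r.2.2.1),
   ("500_1000ms", r.2.2.2.1), ("over_1000ms", r.2.2.2.2)]

-- ===== PRECONDITION & SPEC =====
-- Pre_ excludes exactly the inputs where some test dict lacks the key 'latency_ms',
-- on which Python A raises KeyError.
def Pre_calculate_latency_distribution_py (tests : List (List (String × Int))) : Prop :=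
  (tests.all (fun t => t.any (fun p => p.1 == "latency_ms"))) = true
instance (tests : List (List (String × Int))) : Decidable (Pre_calculate_latency_distribution_py tests) := by unfold Pre_calculate_latency_distribution_py; infer_instance

def pvWitness_calculate_latency_distribution_py : (List (List (String × Int))) :=
  [[("latency_ms", 50)], [("latency_ms", 300)], [("latency_ms", 1500)]]

def Spec_calculate_latency_distribution_py (tests : List (List (String × Int))) (out : List (String × Int)) : Prop := out = calculate_latency_distribution_py_alt tests
instance (tests : List (List (String × Int))) (out : List (String × Int)) : Decidable (Spec_calculate_latency_distribution_py tests out) := by unfold Spec_calculate_latency_distribution_py; infer_instance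

-- ===== CLAIM (what is proved, stated in full; the proofs are below) =====
def Claim_equal_calculate_latency_distribution_py : Prop := ∀ (tests : List (List (String × Int))), Dom_calculate_latency_distribution_py tests → Pre_calculate_latency_distribution_py tests → Spec_calculate_latency_distribution_py tests (calculate_latency_distribution_py tests)

-- ===== LEMMAS AND PROOFS =====

def cntF (p : Int → Bool) (xs : List Int) (s : Int) : Int :=
  xs.foldl (fun s l => if p l then s + 1 else s) s

theorem cntF_cons (p : Int → Bool) (x : Int) (xs : List Int) (s : Int) :
    cntF p (x :: xs) s = cntF p xs (if p x then s + 1 else s) := rfl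

theorem cntF_shift (p : Int → Bool) (xs : List Int) (s : Int) :
    cntF p xs s = s + cntF p xs 0 := by
  induction xs generalizing s with
  | nil => simp [cntF]
  | cons x xs ih =>
    rw [cntF_cons, cntF_cons]
    by_cases h : p x
    · rw [if_pos h, if_pos h, ih (s + 1), ih (0 + 1)]; ring
    · rw [if_neg h, if_neg h, ih s]

theorem altStep_foldl (tests : List (List (String × Int))) (a b c d e : Int) :
    tests.foldl altStep (a, b, c, d, e) =
      (a + cntF (fun l => decide (l < 100)) (tests.map pyGetLatency) 0,
       b + cntF (fun l => decide (100 ≤ l ∧ l < 250)) (tests.map pyGetLatency) 0,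
       c + cntF (fun l => decide (250 ≤ l ∧ l < 500)) (tests.map pyGetLatency) 0,
       d + cntF (fun l => decide (500 ≤ l ∧ l < 1000)) (tests.map pyGetLatency) 0,
       e + cntF (fun l => decide (1000 ≤ l)) (tests.map pyGetLatency) 0) := by
  induction tests generalizing a b c d e with
  | nil => simp [cntF]
  | cons t ts ih =>
    have e1 : ∀ p : Int → Bool, ∀ x : Int, ∀ xs : List Int,
        cntF p (x :: xs) 0 = (if p x then (1 : Int) else 0) + cntF p xs 0 := by
      intro p x xs
      rw [cntF_cons, cntF_shift]
      split <;> ring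
    simp only [List.map, List.foldl]
    rw [e1, e1, e1, e1, e1]
    set l := pyGetLatency t with hl
    have hstep : altStep (a, b, c, d, e) t =
        (if l < 100 then (a + 1, b, c, d, e)
         else if l < 250 then (a, b + 1, c, d, e)
         else if l < 500 then (a, b, c + 1, d, e)
         else if l < 1000 then (a, b, c, d + 1, e)
         else if 1000 ≤ l then (a, b, c, d, e + 1)
         else (a, b, c, d, e)) := rfl
    rw [hstep]
    rcases lt_or_ge l 100 with h1 | h1
    · have q2 : ¬(100 ≤ l ∧ l < 250) := by omega
      have q3 : ¬(250 ≤ l ∧ l < 500) := by omega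
      have q4 : ¬(500 ≤ l ∧ l < 1000) := by omega
      have q5 : ¬(1000 ≤ l) := by omega
      simp only [if_pos h1, ih, decide_eq_true h1,
        decide_eq_false q2, decide_eq_false q3, decide_eq_false q4, decide_eq_false q5,
        Bool.false_eq_true, if_true, if_false, Prod.mk.injEq]
      refine ⟨?_, ?_, ?_, ?_, ?_⟩ <;> omega
    rcases lt_or_ge l 250 with h2 | h2
    · have q2 : 100 ≤ l ∧ l < 250 := by omega
      have q3 : ¬(250 ≤ l ∧ l < 500) := by omega
      have q4 : ¬(500 ≤ l ∧ l < 1000) := by omega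
      have q5 : ¬(1000 ≤ l) := by omega
      simp only [if_neg (by omega : ¬ l < 100), if_pos h2, ih, decide_eq_false (by omega : ¬ l < 100),
        decide_eq_true q2, decide_eq_false q3, decide_eq_false q4, decide_eq_false q5,
        Bool.false_eq_true, if_true, if_false, Prod.mk.injEq]
      refine ⟨?_, ?_, ?_, ?_, ?_⟩ <;> omega
    rcases lt_or_ge l 500 with h3 | h3
    · have q3 : 250 ≤ l ∧ l < 500 := by omega
      simp only [if_neg (by omega : ¬ l < 100), if_neg (by omega : ¬ l < 250), if_pos h3, ih,
        decide_eq_false (by omega : ¬ l < 100), decide_eq_false (by omega : ¬(100 ≤ l ∧ l < 250)),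
        decide_eq_true q3, decide_eq_false (by omega : ¬(500 ≤ l ∧ l < 1000)),
        decide_eq_false (by omega : ¬(1000 ≤ l)),
        Bool.false_eq_true, if_true, if_false, Prod.mk.injEq]
      refine ⟨?_, ?_, ?_, ?_, ?_⟩ <;> omega
    rcases lt_or_ge l 1000 with h4 | h4
    · have q4 : 500 ≤ l ∧ l < 1000 := by omega
      simp only [if_neg (by omega : ¬ l < 100), if_neg (by omega : ¬ l < 250),
        if_neg (by omega : ¬ l < 500), if_pos h4, ih,
        decide_eq_false (by omega : ¬ l < 100), decide_eq_false (by omega : ¬(100 ≤ l ∧ l < 250)),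
        decide_eq_false (by omega : ¬(250 ≤ l ∧ l < 500)), decide_eq_true q4,
        decide_eq_false (by omega : ¬(1000 ≤ l)),
        Bool.false_eq_true, if_true, if_false, Prod.mk.injEq]
      refine ⟨?_, ?_, ?_, ?_, ?_⟩ <;> omega
    · simp only [if_neg (by omega : ¬ l < 100), if_neg (by omega : ¬ l < 250),
        if_neg (by omega : ¬ l < 500), if_neg (by omega : ¬ l < 1000),
        if_pos (by omega : (1000 : Int) ≤ l), ih,
        decide_eq_false (by omega : ¬ l < 100), decide_eq_false (by omega : ¬(100 ≤ l ∧ l < 250)),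
        decide_eq_false (by omega : ¬(250 ≤ l ∧ l < 500)),
        decide_eq_false (by omega : ¬(500 ≤ l ∧ l < 1000)),
        decide_eq_true (by omega : (1000 : Int) ≤ l),
        Bool.false_eq_true, if_true, if_false, Prod.mk.injEq]
      refine ⟨?_, ?_, ?_, ?_, ?_⟩ <;> omega

-- ===== VERDICT (by name: the statement is the Claim_ definition above) =====
theorem calculate_latency_distribution_py_spec : Claim_equal_calculate_latency_distribution_py := by
  intro tests _ _
  unfold Spec_calculate_latency_distribution_py
  unfold calculate_latency_distribution_py calculate_latency_distribution_py_alt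
  rw [altStep_foldl]
  simp [cntF]
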